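-- pv_equiv track=rewrite | github.com/pypi-data/pypi-mirror-310 | packages/xython/xython-3.2.1-py3-none-any.whl/xython/youtil.py | increment_serial
-- ===== SOURCE A (Python) =====
-- def increment_serial(serial):
-- 	"""
-- 	입력으로 들어오는 영문자를 1단계 놓은글자로 바꿔주는 것
--
-- 	:param serial:
-- 	:return:
-- 	"""
-- 	serial_list = list(serial)
-- 	length = len(serial_list)
-- 	for i in range(length -1, -1, -1):
-- 		if serial_list[i] == 'Z':
-- 			serial_list[i]  = 'A'
-- 		else:
-- 			serial_list[i] = chr(ord(serial_list[i]) + 1)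
-- 			break
-- 	return ''.join(serial_list)
-- ===== SOURCE B (Python) =====
-- def increment_serial(serial):
--     stripped = serial.rstrip('Z')
--     num_z = len(serial) - len(stripped)
--     if not stripped:
--         return 'A' * len(serial)
--     return stripped[:-1] + chr(ord(stripped[-1]) + 1) + 'A' * num_z
-- ===== Notes on version B (the rewrite author's own statement) =====
-- stated objective: simpler
-- what changed: Replaces the backward index loop with in-place carry mutation by a single rstrip('Z') plus direct string assembly (increment last kept char, append 'A' run).
import Mathlib
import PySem

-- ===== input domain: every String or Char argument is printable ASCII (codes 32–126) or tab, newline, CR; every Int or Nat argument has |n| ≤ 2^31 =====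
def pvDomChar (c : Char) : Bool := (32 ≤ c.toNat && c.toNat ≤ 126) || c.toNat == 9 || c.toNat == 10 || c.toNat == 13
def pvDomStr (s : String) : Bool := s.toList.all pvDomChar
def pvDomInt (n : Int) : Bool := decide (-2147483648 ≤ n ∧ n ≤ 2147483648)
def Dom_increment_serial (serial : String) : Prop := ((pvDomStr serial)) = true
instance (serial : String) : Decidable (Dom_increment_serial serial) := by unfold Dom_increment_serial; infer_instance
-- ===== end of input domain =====

-- B replaces A's backward carry loop by an rstrip('Z') split and direct string assembly (simpler decomposition; same cost).

-- ===== PORT A =====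
-- A scans indices from the end, turning 'Z' into 'A' until it can increment one char and break.
-- We model the scan on the REVERSED character list: loopA processes the trailing chars first,
-- and on the first non-'Z' increments it and leaves the remainder untouched (the break).
def loopA : List Char → List Char
  | [] => []
  | c :: rest => if c == 'Z' then 'A' :: loopA rest else Char.ofNat (c.toNat + 1) :: rest

def increment_serial (serial : String) : String :=
  String.mk ((loopA serial.toList.reverse).reverse)

-- ===== PORT B =====
-- rstrip('Z') is ported as dropWhile (· == 'Z') on the reversed list; c :: rest below is
-- revStripped, so c = stripped[-1] and rest.reverse = stripped[:-1]; exact for these ASCII chars.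
def increment_serial_alt (serial : String) : String :=
  let revStripped := serial.toList.reverse.dropWhile (· == 'Z')
  let numZ := serial.toList.length - revStripped.length
  match revStripped with
  | [] => String.mk (List.replicate serial.toList.length 'A')
  | c :: rest => String.mk (rest.reverse ++ [Char.ofNat (c.toNat + 1)] ++ List.replicate numZ 'A')

-- ===== PRECONDITION & SPEC =====
def Spec_increment_serial (serial : String) (out : String) : Prop := out = increment_serial_alt serial
instance (serial : String) (out : String) : Decidable (Spec_increment_serial serial out) := by unfold Spec_increment_serial; infer_instance

-- ===== CLAIM (what is proved, stated in full; the proofs are below) =====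
def Claim_equal_increment_serial : Prop := ∀ (serial : String), Dom_increment_serial serial → Spec_increment_serial serial (increment_serial serial)

-- ===== LEMMAS AND PROOFS =====

theorem loopA_eq (l : List Char) :
    loopA l = List.replicate (l.takeWhile (· == 'Z')).length 'A' ++
      (match l.dropWhile (· == 'Z') with
       | [] => []
       | c :: rest => Char.ofNat (c.toNat + 1) :: rest) := by
  induction l with
  | nil => simp [loopA]
  | cons c rest ih =>
    by_cases h : c == 'Z'
    · simp [loopA, h, ih, List.replicate_succ]
    · simp [loopA, h]

theorem takeWhile_len (p : Char → Bool) (l : List Char) :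
    (l.takeWhile p).length = l.length - (l.dropWhile p).length := by
  have h := congrArg List.length (List.takeWhile_append_dropWhile (p := p) (l := l))
  simp only [List.length_append] at h
  omega

-- ===== VERDICT (by name: the statement is the Claim_ definition above) =====
theorem increment_serial_spec : Claim_equal_increment_serial := by
  intro serial _
  unfold Spec_increment_serial increment_serial increment_serial_alt
  rw [loopA_eq]
  rcases h : serial.toList.reverse.dropWhile (· == 'Z') with _ | ⟨c, rest⟩
  · have htw : serial.toList.reverse.takeWhile (· == 'Z') = serial.toList.reverse := by
      have := List.takeWhile_append_dropWhile (p := (· == 'Z')) (l := serial.toList.reverse)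
      simpa [h] using this
    simp [htw, List.reverse_replicate]
  · have hk := takeWhile_len (· == 'Z') serial.toList.reverse
    rw [h] at hk
    simp [hk, List.reverse_replicate, List.append_assoc]
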